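-- pv_equiv track=rewrite | github.com/dhananjay93/leetcode | python/leetcode1051.py | heightChecker
-- ===== SOURCE A (Python) =====
-- from typing import List
--
-- def heightChecker(heights: List[int]) -> int:
--     expected = heights.copy()
--     expected.sort()
--     count = 0
--
--     for i in range(len(heights)):
--         if expected[i] != heights[i]:
--             count += 1
--
--     return count
-- ===== SOURCE B (Python) =====
-- from typing import List
--
-- def heightChecker(heights: List[int]) -> int:
--     # counting-sort style: tally each height, then walk the distinct heights in
--     # ascending order, emitting each one count times and comparing in place.
--     counts = {}
--     for h in heights:
--         counts[h] = counts.get(h, 0) + 1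
--     mismatches = 0
--     i = 0
--     for v in sorted(counts):
--         for _ in range(counts[v]):
--             if heights[i] != v:
--                 mismatches += 1
--             i += 1
--     return mismatches
-- ===== Notes on version B (the rewrite author's own statement) =====
-- stated objective: alternative
-- what changed: Replaces copy-and-full-sort-then-index-compare with a counting-sort pass: tally heights in a dict, sort only the distinct values, and stream the expected sorted sequence against the original in one walk; it trades the full sort for a tally plus a sort of the distinct values, which wins only when values repeat heavily.
import Mathlib
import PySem

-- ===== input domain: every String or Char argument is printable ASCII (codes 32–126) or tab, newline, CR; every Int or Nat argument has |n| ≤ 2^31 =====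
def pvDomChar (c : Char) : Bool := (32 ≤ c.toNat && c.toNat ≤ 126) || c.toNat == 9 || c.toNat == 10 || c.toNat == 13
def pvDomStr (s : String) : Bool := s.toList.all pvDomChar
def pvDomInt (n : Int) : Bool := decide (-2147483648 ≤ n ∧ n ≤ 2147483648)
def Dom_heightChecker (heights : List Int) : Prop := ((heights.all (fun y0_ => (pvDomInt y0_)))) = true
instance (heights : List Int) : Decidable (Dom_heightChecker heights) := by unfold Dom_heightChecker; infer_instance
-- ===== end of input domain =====

-- B replaces copy+full sort+index compare by a counting-sort pass (tally dict, sort distinct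
-- values, stream the expected sequence against the original): objective = alternative.

-- ===== PORT A =====
def heightChecker (heights : List Int) : Int :=
  let expected := PySem.List.sorted heights (fun x => x)
  (PySem.List.pyRange 0 (heights.length : Int)).foldl
    (fun count i =>
      if PySem.List.pyGetD expected i 0 ≠ PySem.List.pyGetD heights i 0 then count + 1 else count)
    0

-- ===== PORT B =====
def heightChecker_alt (heights : List Int) : Int :=
  let counts := PySem.Dict.counter heights
  let st := (PySem.List.sorted counts.keys (fun v => v)).foldl
    (fun (st : Int × Int) v =>
      (PySem.List.pyRange 0 (counts.getD v 0)).foldl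
        (fun (st2 : Int × Int) _ =>
          ((if PySem.List.pyGetD heights st2.2 0 ≠ v then st2.1 + 1 else st2.1), st2.2 + 1))
        st)
    ((0 : Int), (0 : Int))
  st.1

-- ===== PRECONDITION & SPEC =====
def Spec_heightChecker (heights : List Int) (out : Int) : Prop := out = heightChecker_alt heights
instance (heights : List Int) (out : Int) : Decidable (Spec_heightChecker heights out) := by unfold Spec_heightChecker; infer_instance

-- ===== CLAIM (what is proved, stated in full; the proofs are below) =====
def Claim_equal_heightChecker : Prop := ∀ (heights : List Int), Dom_heightChecker heights → Spec_heightChecker heights (heightChecker heights)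

-- ===== LEMMAS AND PROOFS =====

/-- Proof helper: number of positions j where `hs[i+j] ≠ es[j]`, walking `es`. -/
def pvCnt (hs : List Int) : Int → List Int → Int
  | _, [] => 0
  | i, e :: es => (if PySem.List.pyGetD hs i 0 ≠ e then 1 else 0) + pvCnt hs (i + 1) es

theorem pvCnt_append (hs : List Int) (i : Int) (es fs : List Int) :
    pvCnt hs i (es ++ fs) = pvCnt hs i es + pvCnt hs (i + es.length) fs := by
  induction es generalizing i with
  | nil => simp [pvCnt]
  | cons e es ih =>
      simp only [List.cons_append, pvCnt, ih (i + 1), List.length_cons]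
      push_cast
      ring_nf

/-- B's inner loop: any list of length m drives m comparisons against v. -/
theorem pvInner (hs : List Int) (v : Int) (l : List Int) (st : Int × Int) :
    l.foldl (fun (st2 : Int × Int) _ =>
        ((if PySem.List.pyGetD hs st2.2 0 ≠ v then st2.1 + 1 else st2.1), st2.2 + 1)) st
      = (st.1 + pvCnt hs st.2 (List.replicate l.length v), st.2 + l.length) := by
  induction l generalizing st with
  | nil => simp [pvCnt]
  | cons x l ih =>
      simp only [List.foldl_cons, ih, List.length_cons, List.replicate_succ, pvCnt,
        Prod.mk.injEq]
      refine ⟨?_, ?_⟩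
      · split_ifs <;> ring
      · push_cast; ring

/-- The expected sorted sequence generated from a list of distinct values. -/
def pvExp (hs : List Int) (ks : List Int) : List Int :=
  ks.flatMap (fun v => List.replicate (hs.count v) v)

theorem pvOuter (hs : List Int) (ks : List Int) (st : Int × Int) :
    ks.foldl (fun (st : Int × Int) v =>
        (PySem.List.pyRange 0 ((PySem.Dict.counter hs).getD v 0)).foldl
          (fun (st2 : Int × Int) _ =>
            ((if PySem.List.pyGetD hs st2.2 0 ≠ v then st2.1 + 1 else st2.1), st2.2 + 1))
          st) st
      = (st.1 + pvCnt hs st.2 (pvExp hs ks), st.2 + (pvExp hs ks).length) := by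
  induction ks generalizing st with
  | nil => simp [pvExp, pvCnt]
  | cons k ks ih =>
      have h : (PySem.List.pyRange 0 ((PySem.Dict.counter hs).getD k 0)).foldl
          (fun (st2 : Int × Int) _ =>
            ((if PySem.List.pyGetD hs st2.2 0 ≠ k then st2.1 + 1 else st2.1), st2.2 + 1)) st
          = (st.1 + pvCnt hs st.2 (List.replicate (hs.count k) k),
             st.2 + (hs.count k : Int)) := by
        rw [PySem.Dict.getD_counter, PySem.List.pyRange_zero_natCast, pvInner]
        simp
      rw [List.foldl_cons, h, ih]
      simp only [pvExp, List.flatMap_cons, pvCnt_append, List.length_append,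
        List.length_replicate, Prod.mk.injEq]
      refine ⟨by ring, by push_cast; ring⟩

/-- A's loop counts mismatches of `expected` against `hs` position by position. -/
theorem pvLoopA (hs expected : List Int) (m : Nat) (hm : m ≤ expected.length) :
    (PySem.List.pyRange 0 (m : Int)).foldl
      (fun count i =>
        if PySem.List.pyGetD expected i 0 ≠ PySem.List.pyGetD hs i 0 then count + 1 else count) 0
      = pvCnt hs 0 (expected.take m) := by
  induction m with
  | zero => simp [PySem.List.pyRange, pvCnt]
  | succ m ih =>
      have h1 : ((m : Int) + 1) = ((m + 1 : Nat) : Int) := by push_cast; ring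
      have h2 : PySem.List.pyRange 0 ((m + 1 : Nat) : Int)
          = PySem.List.pyRange 0 (m : Int) ++ [(m : Int)] := by
        rw [← h1, PySem.List.pyRange_one_succ_right (by positivity)]
      have hlt : m < expected.length := hm
      rw [h2, List.foldl_append, ih (le_of_lt hlt)]
      have htake : expected.take (m + 1) = expected.take m ++ [expected.getD m 0] := by
        rw [List.take_add_one]
        simp [List.getElem?_eq_getElem hlt]
      rw [htake, pvCnt_append]
      simp only [List.foldl_cons, List.foldl_nil, List.length_take, min_eq_left (le_of_lt hlt),
        pvCnt, PySem.List.pyGetD_natCast, zero_add]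
      split_ifs with ha hb hb
      · ring
      · exact absurd (Ne.symm ha) hb
      · exact absurd (Ne.symm hb) ha
      · ring

theorem pvExp_mem (hs : List Int) (ks : List Int) (x : Int) (hx : x ∈ pvExp hs ks) : x ∈ ks := by
  rcases List.mem_flatMap.mp hx with ⟨k, hk, hxk⟩
  rcases List.eq_of_mem_replicate hxk with rfl
  exact hk

theorem pvExp_count (hs : List Int) (ks : List Int) (hnd : ks.Nodup) (x : Int) :
    (pvExp hs ks).count x = if x ∈ ks then hs.count x else 0 := by
  induction ks with
  | nil => simp [pvExp]
  | cons k ks ih =>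
      rcases List.nodup_cons.mp hnd with ⟨hk, hnd'⟩
      simp only [pvExp, List.flatMap_cons, List.count_append, List.count_replicate]
      rw [show (ks.flatMap fun v => List.replicate (hs.count v) v) = pvExp hs ks from rfl,
        ih hnd']
      by_cases hxk : k = x
      · subst hxk
        simp [hk]
      · have hx' : x ≠ k := fun h => hxk h.symm
        simp [hxk, hx']

theorem pvExp_perm (hs : List Int) (ks : List Int) (hnd : ks.Nodup)
    (hmem : ∀ x, x ∈ ks ↔ x ∈ hs) : (pvExp hs ks).Perm hs := by
  rw [List.perm_iff_count]
  intro a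
  rw [pvExp_count hs ks hnd a]
  by_cases ha : a ∈ ks
  · simp [ha]
  · have : a ∉ hs := fun h => ha ((hmem a).mpr h)
    simp [ha, List.count_eq_zero.mpr this]

theorem pvExp_sorted (hs : List Int) (ks : List Int) (hlt : ks.Pairwise (· < ·)) :
    (pvExp hs ks).Pairwise (· ≤ ·) := by
  induction ks with
  | nil => simp [pvExp]
  | cons k ks ih =>
      rcases List.pairwise_cons.mp hlt with ⟨hk, hlt'⟩
      simp only [pvExp, List.flatMap_cons]
      apply List.pairwise_append.mpr
      refine ⟨?_, ih hlt', ?_⟩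
      · exact List.pairwise_replicate.mpr (Or.inr le_rfl)
      · intro a ha b hb
        rcases List.eq_of_mem_replicate ha with rfl
        exact le_of_lt (hk b (pvExp_mem hs ks b hb))

/-- The streamed expected sequence equals Python's sorted copy. -/
theorem pvExp_eq_sorted (hs : List Int) :
    pvExp hs (PySem.List.sorted ((PySem.Dict.counter hs).keys) (fun v => v))
      = PySem.List.sorted hs (fun x => x) := by
  set ks := PySem.List.sorted ((PySem.Dict.counter hs).keys) (fun v => v) with hks
  have hperm0 : ks.Perm (PySem.Dict.counter hs).keys := PySem.List.sorted_perm _ _ _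
  have hkeys : (PySem.Dict.counter hs).keys = PySem.Set.ofList hs := PySem.Dict.keys_counter hs
  have hnd : ks.Nodup := hperm0.nodup_iff.mpr (hkeys ▸ PySem.Set.nodup_ofList hs)
  have hmem : ∀ x, x ∈ ks ↔ x ∈ hs := by
    intro x
    rw [hperm0.mem_iff, hkeys]
    exact PySem.Set.mem_ofList hs x
  have hle : ks.Pairwise (· ≤ ·) := by
    have := PySem.List.sorted_pairwise ((PySem.Dict.counter hs).keys) (fun v => v)
    simpa [hks] using this
  have hlt : ks.Pairwise (· < ·) :=
    (hle.and hnd).imp (fun h => lt_of_le_of_ne h.1 h.2)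
  have hsorted_le : (PySem.List.sorted hs (fun x => x)).Pairwise (· ≤ ·) := by
    have := PySem.List.sorted_pairwise hs (fun x => x)
    simpa using this
  have hperm : (pvExp hs ks).Perm (PySem.List.sorted hs (fun x => x)) :=
    (pvExp_perm hs ks hnd hmem).trans (PySem.List.sorted_perm hs (fun x => x) false).symm
  exact hperm.eq_of_pairwise
    (fun a b _ _ hab hba => le_antisymm hab hba)
    (pvExp_sorted hs ks hlt) hsorted_le

-- ===== VERDICT (by name: the statement is the Claim_ definition above) =====
theorem heightChecker_spec : Claim_equal_heightChecker := by
  intro heights _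
  show heightChecker heights = heightChecker_alt heights
  have hlen : (PySem.List.sorted heights (fun x => x)).length = heights.length :=
    (PySem.List.sorted_perm heights (fun x => x) false).length_eq
  simp only [heightChecker, heightChecker_alt]
  rw [pvOuter heights, pvExp_eq_sorted heights,
    pvLoopA heights (PySem.List.sorted heights (fun x => x)) heights.length (le_of_eq hlen.symm),
    ← hlen, List.take_length]
  simp
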